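-- pv_equiv track=rewrite | github.com/muhammadsohaibcs/computer-science-portfolio | Artificial Intelligence/lab52.py | iterative_deepening
-- ===== SOURCE A (Python) =====
-- DIRECTIONS = [(-1, -1), (-1, 0), (-1, 1),
--               (0, -1),          (0, 1),
--               (1, -1),  (1, 0), (1, 1)]
--
-- def is_valid(x, y, visited, rows, cols):
--     return 0 <= x < rows and 0 <= y < cols and not visited[x][y]
--
-- def dfs(board, x, y, visited, path, depth, max_depth, results):
--     if depth > max_depth:
--         return
--     path += board[x][y]
--     if len(path) == max_depth:
--         results.add(path)
--     visited[x][y] = True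
--     for dx, dy in DIRECTIONS:
--         nx, ny = x + dx, y + dy
--         if is_valid(nx, ny, visited, len(board), len(board[0])):
--             dfs(board, nx, ny, visited, path, depth + 1, max_depth, results)
--     visited[x][y] = False
--
-- def iterative_deepening(board, target_lengths):
--     results = {length: set() for length in target_lengths}
--     rows, cols = len(board), len(board[0])
--     for length in target_lengths:
--         for i in range(rows):
--             for j in range(cols):
--                 visited = [[False]*cols for _ in range(rows)]
--                 dfs(board, i, j, visited, "", 1, length, results[length])
--     return results
-- ===== SOURCE B (Python) =====
-- DIRECTIONS = [(-1, -1), (-1, 0), (-1, 1),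
--               (0, -1),          (0, 1),
--               (1, -1),  (1, 0), (1, 1)]
--
-- def iterative_deepening(board, target_lengths):
--     # Iterative depth-first search with an explicit stack of immutable
--     # (cell, path, used-cells) states instead of recursion over a shared
--     # visited matrix with backtracking.
--     rows, cols = len(board), len(board[0])
--     results = {}
--     for length in target_lengths:
--         found = set()
--         if length >= 1:
--             for i in range(rows):
--                 for j in range(cols):
--                     stack = [(i, j, "", frozenset())]
--                     while stack:
--                         x, y, path, used = stack.pop()
--                         path = path + board[x][y]
--                         used = used | {(x, y)}
--                         if len(path) == length:
--                             found.add(path)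
--                         if len(used) < length:
--                             for dx, dy in reversed(DIRECTIONS):
--                                 nx, ny = x + dx, y + dy
--                                 if 0 <= nx < rows and 0 <= ny < cols and (nx, ny) not in used:
--                                     stack.append((nx, ny, path, used))
--         results[length] = found
--     return results
-- ===== Notes on version B (the rewrite author's own statement) =====
-- stated objective: alternative
-- what changed: A enumerates paths by recursive DFS over a shared mutable visited matrix with mark/unmark backtracking; B runs an iterative depth-first search with an explicit stack of immutable (cell, path, used-cells frozenset) states, skipping nonpositive target lengths outright. Pre_ excludes only the inputs where A raises IndexError (empty board; a ragged row reached when some target length is positive).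
import Mathlib
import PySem

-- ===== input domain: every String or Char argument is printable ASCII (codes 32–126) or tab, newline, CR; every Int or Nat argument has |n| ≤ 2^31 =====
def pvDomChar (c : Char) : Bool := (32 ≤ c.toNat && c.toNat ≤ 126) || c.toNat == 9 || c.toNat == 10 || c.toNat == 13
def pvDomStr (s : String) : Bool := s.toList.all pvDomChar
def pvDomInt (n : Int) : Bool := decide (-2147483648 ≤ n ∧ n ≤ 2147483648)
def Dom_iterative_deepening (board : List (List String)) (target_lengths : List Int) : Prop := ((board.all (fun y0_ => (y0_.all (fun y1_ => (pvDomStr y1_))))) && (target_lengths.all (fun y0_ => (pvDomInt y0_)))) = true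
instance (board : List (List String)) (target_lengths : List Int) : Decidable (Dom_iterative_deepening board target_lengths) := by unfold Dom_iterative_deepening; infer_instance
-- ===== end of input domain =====

-- B replaces A's recursive DFS over a shared mutable visited matrix (mark/unmark backtracking)
-- by an iterative DFS with an explicit stack of immutable (cell, path, used-cells) states
-- (objective: alternative).

-- ===== PORT A =====
def pvDirections : List (Int × Int) :=
  [(-1,-1), (-1,0), (-1,1), (0,-1), (0,1), (1,-1), (1,0), (1,1)]

-- is_valid(x, y, visited, rows, cols); the pyGetD defaults are never read: the bounds are
-- checked first (Python short-circuits) and visited is rows×cols in every call of the program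
def pvIsValid (x y : Int) (visited : List (List Bool)) (rows cols : Int) : Bool :=
  decide (0 ≤ x) && decide (x < rows) && decide (0 ≤ y) && decide (y < cols) &&
    !(PySem.List.pyGetD (PySem.List.pyGetD visited x []) y true)

-- dfs(board, x, y, visited, path, depth, max_depth, results); paths are kept as List Char
-- (Lean's String.append is kernel-opaque), stored in the set as String.ofList path.
-- board[x][y]'s pyGetD default "" is never read on inputs satisfying Pre_ (callers check bounds).
-- The Nat fuel only makes the recursion total: every caller passes fuel > max_depth - depth,
-- so fuel reaches 0 only when depth > max_depth, where dfs returns results anyway.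
def dfsA (board : List (List String)) : Nat → Int → Int → List (List Bool) →
    List Char → Int → Int → PySem.Set String → PySem.Set String
  | 0, _, _, _, _, _, _, results => results
  | fuel + 1, x, y, visited, path, depth, maxDepth, results =>
    if depth > maxDepth then results
    else
      let path' := path ++ (PySem.List.pyGetD (PySem.List.pyGetD board x []) y "").toList
      let results' := if ((path'.length : Int) = maxDepth) then PySem.Set.add results (String.ofList path') else results
      let visited' := PySem.List.pySetD visited x (PySem.List.pySetD (PySem.List.pyGetD visited x []) y true)
      -- the 'for dx, dy in DIRECTIONS' loop of dfs
      pvDirections.foldl (fun res d =>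
        if pvIsValid (x + d.1) (y + d.2) visited' (PySem.List.len board) (PySem.List.len (board.headD [])) then
          dfsA board fuel (x + d.1) (y + d.2) visited' path' (depth + 1) maxDepth res
        else res) results'

def iterative_deepening (board : List (List String)) (target_lengths : List Int) : List (Int × List String) :=
  -- results = {length: set() for length in target_lengths}
  let results0 : PySem.Dict Int (PySem.Set String) :=
    target_lengths.foldl (fun d L => d.insert L PySem.Set.empty) PySem.Dict.empty
  let rows : Int := PySem.List.len board
  let cols : Int := PySem.List.len (board.headD [])  -- len(board[0]); IndexError for board = [] is outside Pre_
  (target_lengths.foldl (fun d length =>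
    (PySem.List.pyRange 0 rows 1).foldl (fun d i =>
      (PySem.List.pyRange 0 cols 1).foldl (fun d j =>
        -- visited = [[False]*cols for _ in range(rows)]; results[length] is always present (KeyError impossible)
        d.modify length PySem.Set.empty (fun s =>
          dfsA board length.toNat i j ((PySem.List.pyRange 0 rows 1).map (fun _ => List.replicate cols.toNat false)) [] 1 length s))
      d) d) results0).items

-- ===== PORT B =====
-- one stack state of Source B's while loop: (x, y, path, used); the Lean list's HEAD models the
-- TOP of Python's stack (Python appends to / pops from the END), so Python's pushes over
-- reversed(DIRECTIONS) become the valid children, in DIRECTIONS order, prepended to the rest.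
def pvChildren (rows cols L : Int) (x y : Int) (path' : List Char)
    (used' : PySem.Set (Int × Int)) : List (Int × Int × List Char × PySem.Set (Int × Int)) :=
  if ((used'.length : Int) < L) then
    pvDirections.filterMap (fun d =>
      let nx := x + d.1
      let ny := y + d.2
      if decide (0 ≤ nx) && decide (nx < rows) && decide (0 ≤ ny) && decide (ny < cols) &&
          !(PySem.Set.contains used' (nx, ny)) then
        some (nx, ny, path', used')
      else none)
  else []

-- the 'while stack:' loop of Source B (stack top at the Lean list head). The Nat fuel only makes
-- the loop total: a run pops at most pvMeas (below) states, and callers pass fuel = 9^min(L, rows*cols+1),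
-- which the equivalence proof shows is never exhausted.
def stB (board : List (List String)) (rows cols L : Int) :
    Nat → List (Int × Int × List Char × PySem.Set (Int × Int)) → PySem.Set String → PySem.Set String
  | _, [], found => found
  | 0, _ :: _, found => found
  | fuel + 1, (x, y, path, used) :: rest, found =>
    let path' := path ++ (PySem.List.pyGetD (PySem.List.pyGetD board x []) y "").toList
    let used' := PySem.Set.add used (x, y)
    let found' := if ((path'.length : Int) = L) then PySem.Set.add found (String.ofList path') else found
    stB board rows cols L fuel (pvChildren rows cols L x y path' used' ++ rest) found'

def iterative_deepening_alt (board : List (List String)) (target_lengths : List Int) : List (Int × List String) :=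
  let rows : Int := PySem.List.len board
  let cols : Int := PySem.List.len (board.headD [])  -- len(board[0]); board = [] raises, outside Pre_
  (target_lengths.foldl (fun d length =>
    d.insert length
      (if 1 ≤ length then
        (PySem.List.pyRange 0 rows 1).foldl (fun found i =>
          (PySem.List.pyRange 0 cols 1).foldl (fun found j =>
            stB board rows cols length (9 ^ ((min length (rows * cols + 1)).toNat)) [(i, j, [], PySem.Set.empty)] found) found) PySem.Set.empty
       else PySem.Set.empty))
    PySem.Dict.empty).items

-- ===== PRECONDITION & SPEC =====
-- Pre_ excludes exactly the inputs where Python A raises IndexError: the empty board (board[0]),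
-- and boards with a row shorter than len(board[0]) when some positive target makes the scan touch it.
def Pre_iterative_deepening (board : List (List String)) (target_lengths : List Int) : Prop :=
  board ≠ [] ∧
    ((∀ row ∈ board, (board.headD []).length ≤ row.length) ∨ (∀ t ∈ target_lengths, t ≤ 0))
instance (board : List (List String)) (target_lengths : List Int) : Decidable (Pre_iterative_deepening board target_lengths) := by unfold Pre_iterative_deepening; infer_instance

def pvWitness_iterative_deepening : List (List String) × List Int := ([["a", "b"], ["c", "d"]], [2])

def Spec_iterative_deepening (board : List (List String)) (target_lengths : List Int) (out : List (Int × List String)) : Prop := out = iterative_deepening_alt board target_lengths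
instance (board : List (List String)) (target_lengths : List Int) (out : List (Int × List String)) : Decidable (Spec_iterative_deepening board target_lengths out) := by unfold Spec_iterative_deepening; infer_instance

-- ===== CLAIM (what is proved, stated in full; the proofs are below) =====
def Claim_equal_iterative_deepening : Prop := ∀ (board : List (List String)) (target_lengths : List Int), Dom_iterative_deepening board target_lengths → Pre_iterative_deepening board target_lengths → Spec_iterative_deepening board target_lengths (iterative_deepening board target_lengths)

-- ===== LEMMAS AND PROOFS =====

-- marking a cell (visited[x][y] = True) and the cell-is-free test, on the visited matrix itself
def pvMark (visited : List (List Bool)) (x y : Int) : List (List Bool) :=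
  PySem.List.pySetD visited x (PySem.List.pySetD (PySem.List.pyGetD visited x []) y true)

def pvFree (visited : List (List Bool)) (x y : Int) : Bool :=
  decide (0 ≤ x) && decide (x < (visited.length : Int)) && decide (0 ≤ y) &&
    decide (y < ((PySem.List.pyGetD visited x []).length : Int)) &&
    !(PySem.List.pyGetD (PySem.List.pyGetD visited x []) y true)

def pvCountFree (visited : List (List Bool)) : Nat := (visited.map (fun r => r.count false)).sum

theorem pvCount_row_set (r : List Bool) (j : Nat) (hj : j < r.length) (hf : r[j] = false) :
    (r.set j true).count false + 1 = r.count false := by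
  have h2 : r = r.take j ++ r[j] :: r.drop (j+1) := by
    conv_lhs => rw [← List.take_append_drop j r, List.drop_eq_getElem_cons hj]
  rw [List.set_eq_take_cons_drop true hj]
  conv_rhs => rw [h2]
  simp [List.count_append, hf]
  omega

theorem pvCountFree_set (v : List (List Bool)) (i : Nat) (hi : i < v.length) (r' : List Bool) :
    pvCountFree (v.set i r') + (v[i].count false) = pvCountFree v + r'.count false := by
  have hi' : i < (v.map (fun r => r.count false)).length := by simpa using hi
  unfold pvCountFree
  rw [List.map_set, List.sum_set]
  have hs := List.sum_take_add_sum_drop (v.map (fun r => r.count false)) i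
  rw [List.drop_eq_getElem_cons hi'] at hs
  simp only [List.sum_cons, List.getElem_map, List.length_map] at hs ⊢
  rw [if_pos hi]
  omega

theorem pvCountFree_mark_lt (visited : List (List Bool)) (x y : Int)
    (h : pvFree visited x y = true) : pvCountFree (pvMark visited x y) < pvCountFree visited := by
  unfold pvFree at h
  simp only [Bool.and_eq_true, decide_eq_true_eq, Bool.not_eq_eq_eq_not, Bool.not_true] at h
  obtain ⟨⟨⟨⟨hx0, hx1⟩, hy0⟩, hy1⟩, hfree⟩ := h
  rw [PySem.List.pyGetD_eq_getElem visited [] hx0 hx1] at hy1 hfree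
  unfold pvMark
  rw [PySem.List.pyGetD_eq_getElem visited [] hx0 hx1,
      PySem.List.pySetD_of_nonneg _ _ hy0, PySem.List.pySetD_of_nonneg _ _ hx0]
  have hx : x.toNat < visited.length := by omega
  have hy : y.toNat < (visited[x.toNat]).length := by
    have := hy1; omega
  rw [PySem.List.pyGetD_eq_getElem _ true hy0 (by omega)] at hfree
  have h1 := pvCountFree_set visited x.toNat hx ((visited[x.toNat]).set y.toNat true)
  have h2 := pvCount_row_set (visited[x.toNat]) y.toNat hy hfree
  omega


theorem pvCountFree_mark_eq (visited : List (List Bool)) (x y : Int)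
    (h : pvFree visited x y = true) : pvCountFree (pvMark visited x y) + 1 = pvCountFree visited := by
  unfold pvFree at h
  simp only [Bool.and_eq_true, decide_eq_true_eq, Bool.not_eq_eq_eq_not, Bool.not_true] at h
  obtain ⟨⟨⟨⟨hx0, hx1⟩, hy0⟩, hy1⟩, hfree⟩ := h
  rw [PySem.List.pyGetD_eq_getElem visited [] hx0 hx1] at hy1 hfree
  unfold pvMark
  rw [PySem.List.pyGetD_eq_getElem visited [] hx0 hx1,
      PySem.List.pySetD_of_nonneg _ _ hy0, PySem.List.pySetD_of_nonneg _ _ hx0]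
  have hx : x.toNat < visited.length := by omega
  have hy : y.toNat < (visited[x.toNat]).length := by
    have := hy1; omega
  rw [PySem.List.pyGetD_eq_getElem _ true hy0 (by omega)] at hfree
  have h1 := pvCountFree_set visited x.toNat hx ((visited[x.toNat]).set y.toNat true)
  have h2 := pvCount_row_set (visited[x.toNat]) y.toNat hy hfree
  omega
-- the preorder event list of the DFS from (x, y): every reachable (path, cell-count),
-- bounded by the visited matrix; the fuel is always chosen > pvCountFree visited, so the
-- 0 case is never reached on a free cell (both ports are depth-truncations of this tree)
def ev (board : List (List String)) : Nat → List (List Bool) → Int → Int → List Char → Int →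
    List (List Char × Int)
  | 0, _, _, _, _, _ => []
  | fuel + 1, visited, x, y, path, cnt =>
    if pvFree visited x y = true then
      (path ++ (PySem.List.pyGetD (PySem.List.pyGetD board x []) y "").toList, cnt) ::
        pvDirections.flatMap (fun d =>
          ev board fuel (pvMark visited x y) (x + d.1) (y + d.2)
            (path ++ (PySem.List.pyGetD (PySem.List.pyGetD board x []) y "").toList) (cnt + 1))
    else []

theorem ev_nil_of_not_free (board : List (List String)) (fuel : Nat) (visited : List (List Bool))
    (x y : Int) (path : List Char) (cnt : Int) (h : pvFree visited x y = false) :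
    ev board fuel visited x y path cnt = [] := by
  cases fuel with
  | zero => rfl
  | succ f => rw [ev, if_neg (by simp [h])]

-- records of the length-L search: events with cell-count ≤ L whose word has length L
def pvRecsL (L : Int) (evs : List (List Char × Int)) : List String :=
  (evs.filter (fun pc => decide (pc.2 ≤ L) && decide ((pc.1.length : Int) = L))).map (fun pc => String.ofList pc.1)

def pvShape (visited : List (List Bool)) (rows cols : Int) : Prop :=
  ((visited.length : Int) = rows) ∧ ∀ r ∈ visited, ((r.length : Int) = cols)

theorem pvShape_mark (visited : List (List Bool)) (rows cols x y : Int)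
    (h : pvShape visited rows cols) (hf : pvFree visited x y = true) :
    pvShape (pvMark visited x y) rows cols := by
  unfold pvFree at hf
  simp only [Bool.and_eq_true, decide_eq_true_eq] at hf
  obtain ⟨⟨⟨⟨hx0, hx1⟩, hy0⟩, hy1⟩, -⟩ := hf
  obtain ⟨hlen, hrow⟩ := h
  unfold pvMark
  rw [PySem.List.pyGetD_eq_getElem visited [] hx0 (by omega),
      PySem.List.pySetD_of_nonneg _ _ hy0, PySem.List.pySetD_of_nonneg _ _ hx0]
  refine ⟨by simpa using hlen, ?_⟩
  intro r hr
  rcases List.mem_or_eq_of_mem_set hr with hr | rfl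
  · exact hrow r hr
  · rw [List.length_set]
    exact hrow _ (List.getElem_mem _)

theorem pvValid_eq_free (visited : List (List Bool)) (rows cols x y : Int)
    (h : pvShape visited rows cols) :
    (decide (0 ≤ x) && decide (x < rows) && decide (0 ≤ y) && decide (y < cols) &&
      !(PySem.List.pyGetD (PySem.List.pyGetD visited x []) y true)) = pvFree visited x y := by
  obtain ⟨h1, h2⟩ := h
  unfold pvFree
  rw [h1]
  by_cases hx : 0 ≤ x ∧ x < rows
  · have hrow : PySem.List.pyGetD visited x [] = visited[x.toNat]'(by omega) :=
      PySem.List.pyGetD_eq_getElem _ _ hx.1 (by omega)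
    rw [hrow, h2 _ (List.getElem_mem _)]
  · have hx' : (decide (0 ≤ x) && decide (x < rows)) = false := by
      rcases not_and_or.mp hx with h | h <;> simp [h]
    rw [hx']
    simp

theorem ev_count_ge (board : List (List String)) :
    ∀ (fuel : Nat) (visited : List (List Bool)) (x y : Int) (path : List Char) (cnt : Int)
      (pc : List Char × Int), pc ∈ ev board fuel visited x y path cnt → cnt ≤ pc.2 := by
  intro fuel
  induction fuel with
  | zero => intro v x y p c pc hpc; simp [ev] at hpc
  | succ f ih =>
    intro v x y p c pc hpc
    rw [ev] at hpc
    split at hpc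
    · rcases List.mem_cons.mp hpc with rfl | hpc
      · exact le_rfl
      · rw [List.mem_flatMap] at hpc
        obtain ⟨d, -, hd⟩ := hpc
        have := ih _ _ _ _ _ pc hd
        omega
    · simp at hpc

theorem pvRecsL_nil {L : Int} {evs : List (List Char × Int)} (h : ∀ pc ∈ evs, L < pc.2) :
    pvRecsL L evs = [] := by
  unfold pvRecsL
  rw [List.filter_eq_nil_iff.mpr]
  · rfl
  · intro pc hpc
    have := h pc hpc
    simp only [Bool.and_eq_true, decide_eq_true_eq, not_and]
    intro h'
    omega

theorem pvRecsL_cons (L : Int) (p : List Char) (c : Int) (evs : List (List Char × Int)) :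
    pvRecsL L ((p, c) :: evs) =
      (if c ≤ L ∧ ((p.length : Int) = L) then [String.ofList p] else []) ++ pvRecsL L evs := by
  unfold pvRecsL
  rw [List.filter_cons]
  by_cases h : c ≤ L ∧ ((p.length : Int) = L)
  · rw [if_pos (by simp [h.1, h.2]), if_pos h, List.map_cons, List.singleton_append]
  · rw [if_neg (by simpa using h), if_neg h, List.nil_append]

theorem pvRecsL_append (L : Int) (a b : List (List Char × Int)) :
    pvRecsL L (a ++ b) = pvRecsL L a ++ pvRecsL L b := by
  unfold pvRecsL
  rw [List.filter_append, List.map_append]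

theorem pvRecsL_flatMap {α : Type} (L : Int) (g : α → List (List Char × Int)) :
    ∀ (l : List α), pvRecsL L (l.flatMap g) = l.flatMap (fun a => pvRecsL L (g a)) := by
  intro l
  induction l with
  | nil => rfl
  | cons a l ih => rw [List.flatMap_cons, List.flatMap_cons, pvRecsL_append, ih]

theorem pvSet_update_cons {s : PySem.Set String} {a : String} {l : List String} :
    PySem.Set.update s (a :: l) = PySem.Set.update (s.add a) l := rfl

theorem pvSet_update_sub {s : PySem.Set String} {l : List String} (h : ∀ x ∈ l, x ∈ s) :
    PySem.Set.update s l = s := by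
  induction l generalizing s with
  | nil => rfl
  | cons a l ih =>
    rw [pvSet_update_cons]
    have ha : s.add a = s := by
      unfold PySem.Set.add
      rw [if_pos ((PySem.Set.contains_iff s a).mpr (h a (List.mem_cons_self)))]
    rw [ha]
    exact ih (fun x hx => h x (List.mem_cons_of_mem _ hx))

theorem pvSet_update_update (s : PySem.Set String) (l : List String) :
    PySem.Set.update (PySem.Set.update s l) l = PySem.Set.update s l :=
  pvSet_update_sub (fun x hx => (PySem.Set.mem_update s l x).mpr (Or.inr hx))

theorem pvIsValid_eq_free (visited : List (List Bool)) (rows cols x y : Int)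
    (h : pvShape visited rows cols) : pvIsValid x y visited rows cols = pvFree visited x y := by
  unfold pvIsValid
  exact pvValid_eq_free visited rows cols x y h

theorem dfsA_eq (board : List (List String)) (L : Int) :
    ∀ n (visited : List (List Bool)), pvCountFree visited ≤ n →
      pvShape visited (PySem.List.len board) (PySem.List.len (board.headD [])) →
      ∀ (fe fd : Nat) (x y : Int) (path : List Char) (depth : Int) (res : PySem.Set String),
        pvCountFree visited < fe → L - depth < (fd : Int) → pvFree visited x y = true →
        dfsA board fd x y visited path depth L res =
          PySem.Set.update res (pvRecsL L (ev board fe visited x y path depth)) := by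
  intro n
  induction n using Nat.strong_induction_on with
  | _ n IH =>
    intro visited hcf hshape fe fd x y path depth res hfe hfd hfree
    obtain ⟨fe', rfl⟩ : ∃ fe', fe = fe' + 1 := ⟨fe - 1, by omega⟩
    have hlt := pvCountFree_mark_lt visited x y hfree
    rw [ev, if_pos hfree]
    set path' := path ++ (PySem.List.pyGetD (PySem.List.pyGetD board x []) y "").toList with hp
    by_cases hd : depth > L
    · have hnil : pvRecsL L ((path', depth) :: pvDirections.flatMap (fun d =>
          ev board fe' (pvMark visited x y) (x + d.1) (y + d.2) path' (depth + 1))) = [] := by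
        apply pvRecsL_nil
        intro pc hpc
        rcases List.mem_cons.mp hpc with rfl | hpc
        · exact hd
        · rw [List.mem_flatMap] at hpc
          obtain ⟨d, -, hdm⟩ := hpc
          have := ev_count_ge board fe' _ _ _ _ _ pc hdm
          omega
      rw [hnil, PySem.Set.update_nil]
      cases fd with
      | zero => rw [dfsA]
      | succ fd => rw [dfsA, if_pos hd]
    · obtain ⟨fd', rfl⟩ : ∃ fd', fd = fd' + 1 := ⟨fd - 1, by omega⟩
      rw [dfsA, if_neg hd]
      have hmark := pvShape_mark visited _ _ x y hshape hfree
      have hmdef : PySem.List.pySetD visited x (PySem.List.pySetD (PySem.List.pyGetD visited x []) y true) = pvMark visited x y := rfl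
      rw [hmdef]
      -- the for-loop over the direction list
      have hloop : ∀ (dirs : List (Int × Int)) (res' : PySem.Set String),
          dirs.foldl (fun res d =>
            if pvIsValid (x + d.1) (y + d.2) (pvMark visited x y) (PySem.List.len board) (PySem.List.len (board.headD [])) then
              dfsA board fd' (x + d.1) (y + d.2) (pvMark visited x y) path' (depth + 1) L res
            else res) res' =
          PySem.Set.update res' (dirs.flatMap (fun d =>
            pvRecsL L (ev board fe' (pvMark visited x y) (x + d.1) (y + d.2) path' (depth + 1)))) := by
        intro dirs
        induction dirs with
        | nil => intro res'; rw [List.foldl_nil, List.flatMap_nil, PySem.Set.update_nil]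
        | cons d rest ihd =>
          intro res'
          rw [List.foldl_cons, List.flatMap_cons, PySem.Set.update_append]
          rw [pvIsValid_eq_free _ _ _ _ _ hmark]
          by_cases hv : pvFree (pvMark visited x y) (x + d.1) (y + d.2) = true
          · rw [if_pos hv,
              IH (pvCountFree (pvMark visited x y)) (by omega) _ le_rfl hmark fe' fd'
                _ _ _ _ _ (by omega) (by push_cast at hfd ⊢; omega) hv]
            exact ihd _
          · rw [if_neg (by simpa using hv),
              ev_nil_of_not_free board fe' _ _ _ _ _ (by simpa using hv)]
            rw [show pvRecsL L ([] : List (List Char × Int)) = [] from rfl, PySem.Set.update_nil]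
            exact ihd _
      rw [hloop, pvRecsL_cons, pvRecsL_flatMap]
      by_cases hlen : ((path'.length : Int) = L)
      · rw [if_pos hlen, if_pos (show depth ≤ L ∧ ((path'.length : Int) = L) from ⟨by omega, hlen⟩),
            List.singleton_append, pvSet_update_cons]
      · rw [if_neg hlen, if_neg (show ¬(depth ≤ L ∧ ((path'.length : Int) = L)) from by tauto),
            List.nil_append]

-- ===== B-side machinery: used-set states vs the visited matrix =====

-- the visited matrix corresponding to a used-cells set
def pvToVis (rows cols : Int) (used : PySem.Set (Int × Int)) : List (List Bool) :=
  (List.range rows.toNat).map (fun (i : Nat) =>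
    (List.range cols.toNat).map (fun (j : Nat) => PySem.Set.contains used ((i : Int), (j : Int))))

theorem pvToVis_row (rows cols x : Int) (used : PySem.Set (Int × Int))
    (hx0 : 0 ≤ x) (hx1 : x < rows) :
    PySem.List.pyGetD (pvToVis rows cols used) x [] =
      (List.range cols.toNat).map (fun (j : Nat) => PySem.Set.contains used (x, (j : Int))) := by
  have hlen : x < ((pvToVis rows cols used).length : Int) := by
    simp only [pvToVis, List.length_map, List.length_range]
    omega
  rw [PySem.List.pyGetD_eq_getElem _ _ hx0 hlen]
  simp only [pvToVis, List.getElem_map, List.getElem_range]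
  have hc : ((x.toNat : Int)) = x := by omega
  rw [hc]

theorem pvToVis_free (rows cols : Int) (hr : 0 ≤ rows) (hc : 0 ≤ cols)
    (used : PySem.Set (Int × Int)) (x y : Int) :
    pvFree (pvToVis rows cols used) x y =
      (decide (0 ≤ x) && decide (x < rows) && decide (0 ≤ y) && decide (y < cols) &&
        !(PySem.Set.contains used (x, y))) := by
  unfold pvFree
  have hlen : (((pvToVis rows cols used).length : Nat) : Int) = rows := by
    simp only [pvToVis, List.length_map, List.length_range]
    omega
  rw [hlen]
  by_cases hx : 0 ≤ x ∧ x < rows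
  · rw [pvToVis_row rows cols x used hx.1 hx.2]
    rw [List.length_map, List.length_range]
    have hcc : ((cols.toNat : Int)) = cols := by omega
    rw [hcc]
    by_cases hy : 0 ≤ y ∧ y < cols
    · have hyl : y < (((List.range cols.toNat).map
          (fun (j : Nat) => PySem.Set.contains used (x, (j : Int)))).length : Int) := by
        rw [List.length_map, List.length_range]
        omega
      rw [PySem.List.pyGetD_eq_getElem _ _ hy.1 hyl]
      simp only [List.getElem_map, List.getElem_range]
      have h2 : ((y.toNat : Int)) = y := by omega
      rw [h2]
    · rcases not_and_or.mp hy with h | h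
      · simp [h]
      · have hyc : (decide (y < cols)) = false := by
          simp only [decide_eq_false_iff_not]
          omega
        simp [hyc]
  · rcases not_and_or.mp hx with h | h <;> simp [h]

theorem pvContains_add_self {κ : Type} [BEq κ] [LawfulBEq κ] (s : PySem.Set κ) (a : κ) :
    PySem.Set.contains (PySem.Set.add s a) a = true :=
  (PySem.Set.contains_iff _ _).mpr ((PySem.Set.mem_add s a a).mpr (Or.inr rfl))

theorem pvContains_add_ne {κ : Type} [BEq κ] [LawfulBEq κ] (s : PySem.Set κ) (a b : κ)
    (h : b ≠ a) : PySem.Set.contains (PySem.Set.add s a) b = PySem.Set.contains s b := by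
  by_cases hb : b ∈ s
  · rw [(PySem.Set.contains_iff _ _).mpr ((PySem.Set.mem_add s a b).mpr (Or.inl hb)),
        (PySem.Set.contains_iff _ _).mpr hb]
  · have h1 : b ∉ PySem.Set.add s a := fun hm =>
      ((PySem.Set.mem_add s a b).mp hm).elim hb h
    cases hc : PySem.Set.contains (PySem.Set.add s a) b with
    | false =>
      cases hc' : PySem.Set.contains s b with
      | false => rfl
      | true => exact absurd ((PySem.Set.contains_iff _ _).mp hc') hb
    | true => exact absurd ((PySem.Set.contains_iff _ _).mp hc) h1

theorem pvToVis_mark (rows cols x y : Int) (used : PySem.Set (Int × Int))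
    (hx0 : 0 ≤ x) (hx1 : x < rows) (hy0 : 0 ≤ y) (hy1 : y < cols) :
    pvMark (pvToVis rows cols used) x y = pvToVis rows cols (PySem.Set.add used (x, y)) := by
  unfold pvMark
  rw [pvToVis_row rows cols x used hx0 hx1,
      PySem.List.pySetD_of_nonneg _ _ hy0, PySem.List.pySetD_of_nonneg _ _ hx0]
  apply List.ext_getElem
  · simp only [List.length_set, pvToVis, List.length_map, List.length_range]
  · intro i hi1 hi2
    simp only [pvToVis, List.length_map, List.length_range] at hi2
    by_cases hix : i = x.toNat
    · subst hix
      rw [List.getElem_set_self (by simp only [List.length_set, pvToVis, List.length_map, List.length_range]; omega)]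
      simp only [pvToVis, List.getElem_map, List.getElem_range]
      have hxi : ((x.toNat : Int)) = x := by omega
      rw [hxi]
      apply List.ext_getElem
      · simp only [List.length_set, List.length_map, List.length_range]
      · intro j hj1 hj2
        simp only [List.length_map, List.length_range] at hj2
        by_cases hjy : j = y.toNat
        · subst hjy
          rw [List.getElem_set_self (by simp only [List.length_set, List.length_map, List.length_range]; omega)]
          simp only [List.getElem_map, List.getElem_range]
          have hyj : ((y.toNat : Int)) = y := by omega
          rw [hyj, pvContains_add_self]
        · rw [List.getElem_set_ne (by omega)]
          simp only [List.getElem_map, List.getElem_range]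
          refine (pvContains_add_ne used (x, y) (x, (j : Int)) ?_).symm
          intro hcontra
          apply hjy
          have := congrArg Prod.snd hcontra
          simp only at this
          omega
    · rw [List.getElem_set_ne (by omega)]
      simp only [pvToVis, List.getElem_map, List.getElem_range]
      apply List.map_congr_left
      intro j hj
      refine (pvContains_add_ne used (x, y) ((i : Int), (j : Int)) ?_).symm
      intro hcontra
      apply hix
      have := congrArg Prod.fst hcontra
      simp only at this
      omega

-- the fresh visited matrix A builds for every start cell
def pvFresh (rows cols : Int) : List (List Bool) :=
  (PySem.List.pyRange 0 rows 1).map (fun _ => List.replicate cols.toNat false)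

theorem pvToVis_empty (rows cols : Int) :
    pvToVis rows cols PySem.Set.empty = pvFresh rows cols := by
  apply List.ext_getElem
  · simp only [pvToVis, pvFresh, List.length_map, List.length_range, PySem.List.length_pyRange_one]
    omega
  · intro i hi1 hi2
    simp only [pvToVis, pvFresh, List.getElem_map, List.getElem_range]
    apply List.ext_getElem
    · simp only [List.length_map, List.length_range, List.length_replicate]
    · intro j hj1 hj2
      simp only [List.getElem_map, List.getElem_range, List.getElem_replicate]
      rfl

-- the termination measure of B's stack loop: a run of stB pops at most this many states
def pvMeas (L : Int) (stack : List (Int × Int × List Char × PySem.Set (Int × Int))) : Nat :=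
  (stack.map (fun s => 9 ^ ((L - (s.2.2.2.length : Int)).toNat))).sum

theorem pvMeas_tail_lt (L : Int) (s : Int × Int × List Char × PySem.Set (Int × Int))
    (rest : List (Int × Int × List Char × PySem.Set (Int × Int))) :
    pvMeas L rest < pvMeas L (s :: rest) := by
  unfold pvMeas
  rw [List.map_cons, List.sum_cons]
  have : 0 < 9 ^ ((L - (s.2.2.2.length : Int)).toNat) := Nat.pow_pos (by norm_num)
  omega

theorem pvMeas_children_lt (L rows cols x y : Int) (path path' : List Char)
    (used : PySem.Set (Int × Int)) (hnc : PySem.Set.contains used (x, y) = false)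
    (hub : ((used.length : Int)) ≤ rows * cols)
    (rest : List (Int × Int × List Char × PySem.Set (Int × Int))) :
    pvMeas (min L (rows * cols + 1)) (pvChildren rows cols L x y path' (PySem.Set.add used (x, y)) ++ rest) <
      pvMeas (min L (rows * cols + 1)) ((x, y, path, used) :: rest) := by
  have hmem : (x, y) ∉ used := fun h => by
    rw [(PySem.Set.contains_iff used (x, y)).mpr h] at hnc; exact Bool.true_eq_false.mp hnc
  have hlen : (PySem.Set.add used (x, y)).length = used.length + 1 := by
    rw [PySem.Set.add_of_not_mem hmem, List.length_append, List.length_cons, List.length_nil]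
  unfold pvMeas
  rw [List.map_append, List.sum_append, List.map_cons, List.sum_cons]
  have hterm : ∀ t ∈ (pvChildren rows cols L x y path' (PySem.Set.add used (x, y))).map
      (fun s => 9 ^ ((min L (rows * cols + 1) - (s.2.2.2.length : Int)).toNat)),
      t = 9 ^ ((min L (rows * cols + 1) - ((used.length : Int) + 1)).toNat) := by
    intro t ht
    rw [List.mem_map] at ht
    obtain ⟨c, hc, rfl⟩ := ht
    unfold pvChildren at hc
    split at hc
    · rw [List.mem_filterMap] at hc
      obtain ⟨d, -, hd⟩ := hc
      simp only [] at hd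
      split at hd
      · injection hd with hd2
        subst hd2
        simp only [hlen, Nat.cast_add, Nat.cast_one]
      · exact absurd hd (by simp)
    · simp at hc
  by_cases hL : ((PySem.Set.add used (x, y)).length : Int) < L
  · have hchl : (pvChildren rows cols L x y path' (PySem.Set.add used (x, y))).length ≤ 8 := by
      unfold pvChildren
      rw [if_pos hL]
      calc (pvDirections.filterMap _).length ≤ pvDirections.length := List.length_filterMap_le _ _
        _ = 8 := rfl
    have hsum : ((pvChildren rows cols L x y path' (PySem.Set.add used (x, y))).map
        (fun s => 9 ^ ((min L (rows * cols + 1) - (s.2.2.2.length : Int)).toNat))).sum ≤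
        8 * 9 ^ ((min L (rows * cols + 1) - ((used.length : Int) + 1)).toNat) := by
      calc _ ≤ ((pvChildren rows cols L x y path' (PySem.Set.add used (x, y))).map
            (fun s => 9 ^ ((min L (rows * cols + 1) - (s.2.2.2.length : Int)).toNat))).length *
            9 ^ ((min L (rows * cols + 1) - ((used.length : Int) + 1)).toNat) := by
            apply List.sum_le_card_nsmul
            intro t ht
            rw [hterm t ht]
        _ ≤ 8 * 9 ^ ((min L (rows * cols + 1) - ((used.length : Int) + 1)).toNat) := by
            apply Nat.mul_le_mul_right
            rw [List.length_map]
            exact hchl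
    have hexp : (min L (rows * cols + 1) - (used.length : Int)).toNat =
        (min L (rows * cols + 1) - ((used.length : Int) + 1)).toNat + 1 := by
      rw [hlen] at hL
      push_cast at hL
      omega
    have hpow : 0 < 9 ^ ((min L (rows * cols + 1) - ((used.length : Int) + 1)).toNat) := Nat.pow_pos (by norm_num)
    rw [hexp, pow_succ]
    omega
  · have hch : pvChildren rows cols L x y path' (PySem.Set.add used (x, y)) = [] := by
      unfold pvChildren
      rw [if_neg hL]
    rw [hch]
    simp only [List.map_nil, List.sum_nil, Nat.zero_add]
    have : 0 < 9 ^ ((min L (rows * cols + 1) - (used.length : Int)).toNat) := Nat.pow_pos (by norm_num)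
    omega

theorem pvFlatMap_filterMap {α β γ : Type} (f : α → Option β) (g : β → List γ) (h : α → List γ) :
    ∀ l : List α, (∀ a ∈ l, (∀ c, f a = some c → g c = h a) ∧ (f a = none → h a = [])) →
      (l.filterMap f).flatMap g = l.flatMap h := by
  intro l
  induction l with
  | nil => intro _; rfl
  | cons a l ih =>
    intro hl
    rw [List.filterMap_cons, List.flatMap_cons]
    cases hfa : f a with
    | none =>
      rw [(hl a List.mem_cons_self).2 hfa, List.nil_append]
      exact ih (fun a' ha' => hl a' (List.mem_cons_of_mem _ ha'))
    | some c =>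
      rw [List.flatMap_cons, (hl a List.mem_cons_self).1 c hfa]
      rw [ih (fun a' ha' => hl a' (List.mem_cons_of_mem _ ha'))]

-- invariant of every state B ever pushes: in-bounds cell, cell outside its used set,
-- and the used set small enough that the state was within the depth budget
def pvStOK (rows cols L : Int) (s : Int × Int × List Char × PySem.Set (Int × Int)) : Prop :=
  0 ≤ s.1 ∧ s.1 < rows ∧ 0 ≤ s.2.1 ∧ s.2.1 < cols ∧
  PySem.Set.contains s.2.2.2 (s.1, s.2.1) = false ∧ ((s.2.2.2.length : Int) + 1 ≤ L) ∧
  s.2.2.2.Nodup ∧ (∀ c ∈ s.2.2.2, 0 ≤ c.1 ∧ c.1 < rows ∧ 0 ≤ c.2 ∧ c.2 < cols)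

-- a duplicate-free set of in-bounds cells has at most rows*cols elements
theorem pvUsed_len_le (rows cols : Int) (hr : 0 ≤ rows) (hc : 0 ≤ cols)
    (used : PySem.Set (Int × Int)) (hnd : used.Nodup)
    (hb : ∀ c ∈ used, 0 ≤ c.1 ∧ c.1 < rows ∧ 0 ≤ c.2 ∧ c.2 < cols) :
    ((used.length : Int)) ≤ rows * cols := by
  classical
  have hsub : used.toFinset ⊆ Finset.Ico (0 : Int) rows ×ˢ Finset.Ico (0 : Int) cols := by
    intro c hcm
    rw [List.mem_toFinset] at hcm
    obtain ⟨h1, h2, h3, h4⟩ := hb c hcm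
    rw [Finset.mem_product, Finset.mem_Ico, Finset.mem_Ico]
    exact ⟨⟨h1, h2⟩, ⟨h3, h4⟩⟩
  have hcard := Finset.card_le_card hsub
  rw [List.toFinset_card_of_nodup hnd, Finset.card_product, Int.card_Ico, Int.card_Ico] at hcard
  have h1 : (((rows - 0).toNat * (cols - 0).toNat : Nat) : Int) = rows * cols := by
    push_cast
    rw [Int.toNat_of_nonneg (by omega), Int.toNat_of_nonneg (by omega)]
    ring
  calc ((used.length : Int)) ≤ (((rows - 0).toNat * (cols - 0).toNat : Nat) : Int) := by exact_mod_cast hcard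
    _ = rows * cols := h1

theorem stB_eq (board : List (List String)) (rows cols L : Int) (hr : 0 ≤ rows) (hc : 0 ≤ cols) :
    ∀ (fuel : Nat) (stack : List (Int × Int × List Char × PySem.Set (Int × Int))) (found : PySem.Set String),
      pvMeas (min L (rows * cols + 1)) stack ≤ fuel → (∀ s ∈ stack, pvStOK rows cols L s) →
      stB board rows cols L fuel stack found = PySem.Set.update found
        (stack.flatMap (fun s =>
          pvRecsL L (ev board (pvCountFree (pvToVis rows cols s.2.2.2) + 1) (pvToVis rows cols s.2.2.2) s.1 s.2.1 s.2.2.1 ((s.2.2.2.length : Int) + 1)))) := by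
  intro fuel
  induction fuel with
  | zero =>
    intro stack found hm hok
    match stack with
    | [] => rw [stB, List.flatMap_nil, PySem.Set.update_nil]
    | s :: rest =>
      exfalso
      have := pvMeas_tail_lt (min L (rows * cols + 1)) s rest
      omega
  | succ f IH =>
    intro stack found hm hok
    match stack with
    | [] => rw [stB, List.flatMap_nil, PySem.Set.update_nil]
    | (x, y, path, used) :: rest =>
      obtain ⟨hx0, hx1, hy0, hy1, hnc, hdep, hnd, hbnd⟩ := hok _ List.mem_cons_self
      dsimp only at hx0 hx1 hy0 hy1 hnc hdep hnd hbnd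
      have hmem : (x, y) ∉ used := by
        intro hmm
        rw [(PySem.Set.contains_iff used (x, y)).mpr hmm] at hnc
        simp at hnc
      rw [stB]
      set path' := path ++ (PySem.List.pyGetD (PySem.List.pyGetD board x []) y "").toList with hp
      set used' := PySem.Set.add used (x, y) with hu
      have hulen : used'.length = used.length + 1 := by
        rw [hu, PySem.Set.add_of_not_mem hmem, List.length_append, List.length_cons, List.length_nil]
      have hfree : pvFree (pvToVis rows cols used) x y = true := by
        rw [pvToVis_free rows cols hr hc]
        simp [hx0, hx1, hy0, hy1, hmem]
      have hcm : pvCountFree (pvToVis rows cols used') + 1 = pvCountFree (pvToVis rows cols used) := by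
        rw [hu, ← pvToVis_mark rows cols x y used hx0 hx1 hy0 hy1]
        exact pvCountFree_mark_eq _ _ _ hfree
      -- the head's event tree, unfolded one level
      have hev : ev board (pvCountFree (pvToVis rows cols used) + 1) (pvToVis rows cols used) x y path ((used.length : Int) + 1) =
          (path', (used.length : Int) + 1) ::
            pvDirections.flatMap (fun d =>
              ev board (pvCountFree (pvToVis rows cols used)) (pvToVis rows cols used') (x + d.1) (y + d.2) path' (((used.length : Int) + 1) + 1)) := by
        rw [ev, if_pos hfree, pvToVis_mark rows cols x y used hx0 hx1 hy0 hy1, ← hu]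
      rw [List.flatMap_cons, hev, pvRecsL_cons,
          if_congr (show ((used.length : Int) + 1 ≤ L ∧ ((path'.length : Int) = L)) ↔
            ((path'.length : Int) = L) from ⟨fun h => h.2, fun h => ⟨hdep, h⟩⟩) rfl rfl]
      rw [pvRecsL_flatMap]
      by_cases hL : ((used'.length : Int) < L)
      · -- children really pushed
        have hchfm : (pvChildren rows cols L x y path' used').flatMap
            (fun s => pvRecsL L (ev board (pvCountFree (pvToVis rows cols s.2.2.2) + 1) (pvToVis rows cols s.2.2.2) s.1 s.2.1 s.2.2.1 ((s.2.2.2.length : Int) + 1))) =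
            pvDirections.flatMap (fun d =>
              pvRecsL L (ev board (pvCountFree (pvToVis rows cols used)) (pvToVis rows cols used') (x + d.1) (y + d.2) path' (((used.length : Int) + 1) + 1))) := by
          unfold pvChildren
          rw [if_pos hL]
          apply pvFlatMap_filterMap
          intro d _
          constructor
          · intro c hcd
            dsimp only at hcd
            split at hcd
            · injection hcd with hcd2
              subst hcd2
              dsimp only
              rw [hcm, hulen]
              push_cast
              ring_nf
            · exact absurd hcd (by simp)
          · intro hnone
            dsimp only at hnone
            split at hnone
            · exact absurd hnone (by simp)
            · rename_i hcond
              rw [ev_nil_of_not_free board _ _ _ _ _ _ (by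
                rw [pvToVis_free rows cols hr hc]
                simpa using hcond)]
              rfl
        have hml := pvMeas_children_lt L rows cols x y path path' used hnc
          (pvUsed_len_le rows cols hr hc used hnd hbnd) rest
        rw [← hu] at hml
        have hok' : ∀ s ∈ pvChildren rows cols L x y path' used' ++ rest, pvStOK rows cols L s := by
          intro s hs
          rcases List.mem_append.mp hs with hs | hs
          · unfold pvChildren at hs
            rw [if_pos hL] at hs
            rw [List.mem_filterMap] at hs
            obtain ⟨d, -, hd⟩ := hs
            dsimp only at hd
            split at hd
            · rename_i hcond
              cases hd
              simp only [Bool.and_eq_true, decide_eq_true_eq, Bool.not_eq_eq_eq_not,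
                Bool.not_true] at hcond
              refine ⟨hcond.1.1.1.1, hcond.1.1.1.2, hcond.1.1.2, hcond.1.2, hcond.2,
                by dsimp only; omega, ?_, ?_⟩
              · exact PySem.Set.nodup_add used (x, y) hnd
              · intro c hcmem
                dsimp only at hcmem
                rcases (PySem.Set.mem_add used (x, y) c).mp (by rw [← hu]; exact hcmem) with hcc | rfl
                · exact hbnd c hcc
                · exact ⟨hx0, hx1, hy0, hy1⟩
            · exact absurd hd (by simp)
          · exact hok _ (List.mem_cons_of_mem _ hs)
        rw [IH _ _ (by omega) hok', List.flatMap_append, hchfm]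
        by_cases hlen : ((path'.length : Int) = L)
        · rw [if_pos hlen, if_pos hlen, List.singleton_append, List.cons_append, pvSet_update_cons]
        · rw [if_neg hlen, if_neg hlen, List.nil_append]
      · -- depth budget exhausted: nothing pushed, the remaining tree records nothing
        have hch : pvChildren rows cols L x y path' used' = [] := by
          unfold pvChildren
          rw [if_neg hL]
        have hrecnil : pvDirections.flatMap (fun d =>
            pvRecsL L (ev board (pvCountFree (pvToVis rows cols used)) (pvToVis rows cols used') (x + d.1) (y + d.2) path' (((used.length : Int) + 1) + 1))) = [] := by
          rw [List.flatMap_eq_nil_iff]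
          intro d _
          apply pvRecsL_nil
          intro pc hpc
          have := ev_count_ge board _ _ (x + d.1) (y + d.2) path' (((used.length : Int) + 1) + 1) pc hpc
          rw [hulen] at hL
          push_cast at hL
          omega
        rw [hch, List.nil_append]
        rw [IH _ _ (by have := pvMeas_tail_lt (min L (rows * cols + 1)) (x, y, path, used) rest; omega)
            (fun s hs => hok _ (List.mem_cons_of_mem _ hs)), hrecnil]
        by_cases hlen : ((path'.length : Int) = L)
        · rw [if_pos hlen, if_pos hlen, List.append_nil, List.singleton_append, pvSet_update_cons]
        · rw [if_neg hlen, if_neg hlen, List.append_nil, List.nil_append]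

theorem stB_start (board : List (List String)) (rows cols L : Int) (hr : 0 ≤ rows) (hc : 0 ≤ cols)
    (hL : 1 ≤ L) (i j : Int) (hi0 : 0 ≤ i) (hi1 : i < rows) (hj0 : 0 ≤ j) (hj1 : j < cols)
    (found : PySem.Set String) :
    stB board rows cols L (9 ^ ((min L (rows * cols + 1)).toNat)) [(i, j, [], PySem.Set.empty)] found =
      PySem.Set.update found (pvRecsL L (ev board (pvCountFree (pvFresh rows cols) + 1) (pvFresh rows cols) i j [] 1)) := by
  have hms : pvMeas (min L (rows * cols + 1)) [(i, j, [], PySem.Set.empty)] ≤ 9 ^ ((min L (rows * cols + 1)).toNat) := by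
    simp [pvMeas, PySem.Set.empty]
  have h := stB_eq board rows cols L hr hc (9 ^ ((min L (rows * cols + 1)).toNat)) [(i, j, [], PySem.Set.empty)] found hms
    (by
      intro s hs
      rcases List.mem_singleton.mp hs with rfl
      exact ⟨hi0, hi1, hj0, hj1, rfl, by simpa using hL, List.nodup_nil, by intro c hcm; simp at hcm⟩)
  rw [h]
  simp only [List.flatMap_cons, List.flatMap_nil, List.append_nil]
  rw [pvToVis_empty]
  norm_num

theorem pvFoldSet {α : Type} (g : α → List String) (F : PySem.Set String → α → PySem.Set String) :
    ∀ xs : List α, (∀ f x, x ∈ xs → F f x = PySem.Set.update f (g x)) →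
      ∀ f, xs.foldl F f = PySem.Set.update f (xs.flatMap g) := by
  intro xs
  induction xs with
  | nil => intro _ f; rw [List.foldl_nil, List.flatMap_nil, PySem.Set.update_nil]
  | cons x xs ih =>
    intro hF f
    rw [List.foldl_cons, hF f x List.mem_cons_self,
        ih (fun f' x' hx' => hF f' x' (List.mem_cons_of_mem _ hx')),
        List.flatMap_cons, PySem.Set.update_append]

-- the records of the length-L search collected over all start cells
def pvSR (board : List (List String)) (rows cols L : Int) : List String :=
  (PySem.List.pyRange 0 rows 1).flatMap (fun i =>
    (PySem.List.pyRange 0 cols 1).flatMap (fun j =>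
      pvRecsL L (ev board (pvCountFree (pvFresh rows cols) + 1) (pvFresh rows cols) i j [] 1)))

theorem pvScanB (board : List (List String)) (rows cols L : Int) (hr : 0 ≤ rows) (hc : 0 ≤ cols)
    (hL : 1 ≤ L) :
    (PySem.List.pyRange 0 rows 1).foldl (fun found i =>
      (PySem.List.pyRange 0 cols 1).foldl (fun found j =>
        stB board rows cols L (9 ^ ((min L (rows * cols + 1)).toNat)) [(i, j, [], PySem.Set.empty)] found) found) PySem.Set.empty =
    PySem.Set.update PySem.Set.empty (pvSR board rows cols L) := by
  unfold pvSR
  apply pvFoldSet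
  intro f i hi
  have hib := PySem.List.mem_pyRange_one.mp hi
  apply pvFoldSet
  intro f' j hj
  have hjb := PySem.List.mem_pyRange_one.mp hj
  exact stB_start board rows cols L hr hc hL i j hib.1 hib.2 hjb.1 hjb.2 f'
-- one pass of A (the scan over all start cells for one target length L')
def pvPassA (board : List (List String)) (rows cols : Int)
    (d : PySem.Dict Int (PySem.Set String)) (L' : Int) : PySem.Dict Int (PySem.Set String) :=
  (PySem.List.pyRange 0 rows 1).foldl (fun d i =>
    (PySem.List.pyRange 0 cols 1).foldl (fun d j =>
      d.modify L' PySem.Set.empty (fun s =>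
        dfsA board L'.toNat i j (pvFresh rows cols) [] 1 L' s)) d) d

theorem pvFresh_shape (rows cols : Int) (hr : 0 ≤ rows) (hc : 0 ≤ cols) :
    pvShape (pvFresh rows cols) rows cols := by
  constructor
  · simp only [pvFresh, List.length_map, PySem.List.length_pyRange_one]
    omega
  · intro r hrm
    simp only [pvFresh, List.mem_map] at hrm
    obtain ⟨-, -, rfl⟩ := hrm
    simp only [List.length_replicate]
    omega

theorem pvFresh_free (rows cols i j : Int) (h0 : 0 ≤ i) (h1 : i < rows) (h2 : 0 ≤ j) (h3 : j < cols) :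
    pvFree (pvFresh rows cols) i j = true := by
  have hlen : ((pvFresh rows cols).length : Int) = rows := by
    simp only [pvFresh, List.length_map, PySem.List.length_pyRange_one]
    omega
  have hrow : PySem.List.pyGetD (pvFresh rows cols) i [] = List.replicate cols.toNat false := by
    rw [PySem.List.pyGetD_eq_getElem _ _ h0 (by omega)]
    simp [pvFresh]
  have hcell : PySem.List.pyGetD (List.replicate cols.toNat false) j true = false := by
    rw [PySem.List.pyGetD_eq_getElem _ _ h2 (by simp; omega)]
    simp
  unfold pvFree
  rw [hrow, hlen, hcell]
  simp only [List.length_replicate, Bool.not_false, Bool.and_true]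
  simp only [Bool.and_eq_true, decide_eq_true_eq]
  omega

theorem pvFold_proj {α : Type} (K0 : List Int) (L : Int) (g : α → List String)
    (F : PySem.Dict Int (PySem.Set String) → α → PySem.Dict Int (PySem.Set String)) :
    ∀ (xs : List α),
    (∀ d x, x ∈ xs → d.keys = K0 → (F d x).keys = K0 ∧
        (F d x).getD L PySem.Set.empty = PySem.Set.update (d.getD L PySem.Set.empty) (g x)) →
    ∀ d, d.keys = K0 →
      (xs.foldl F d).keys = K0 ∧
      (xs.foldl F d).getD L PySem.Set.empty = PySem.Set.update (d.getD L PySem.Set.empty) (xs.flatMap g) := by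
  intro xs
  induction xs with
  | nil =>
    intro _ d hd
    exact ⟨by rw [List.foldl_nil]; exact hd, by rw [List.foldl_nil, List.flatMap_nil, PySem.Set.update_nil]⟩
  | cons x xs ih =>
    intro hF d hd
    obtain ⟨hk, hv⟩ := hF d x List.mem_cons_self hd
    obtain ⟨hk', hv'⟩ := ih (fun d x' hx' hd' => hF d x' (List.mem_cons_of_mem _ hx') hd') (F d x) hk
    refine ⟨by rw [List.foldl_cons]; exact hk', ?_⟩
    rw [List.foldl_cons, hv', hv, List.flatMap_cons, PySem.Set.update_append]

theorem pvPassA_proj (board : List (List String)) (rows cols : Int)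
    (hr : rows = PySem.List.len board) (hcz : cols = PySem.List.len (board.headD []))
    (K0 : List Int) (L' L : Int) (hL' : L' ∈ K0) :
    ∀ (d : PySem.Dict Int (PySem.Set String)), d.keys = K0 → (pvPassA board rows cols d L').keys = K0 ∧
      (pvPassA board rows cols d L').getD L PySem.Set.empty =
        (if L = L' then PySem.Set.update (d.getD L PySem.Set.empty) (pvSR board rows cols L')
         else d.getD L PySem.Set.empty) := by
  have hr0 : (0 : Int) ≤ rows := by rw [hr]; simp [PySem.List.len_eq]
  have hc0 : (0 : Int) ≤ cols := by rw [hcz]; simp [PySem.List.len_eq]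
  have hshape : pvShape (pvFresh rows cols) (PySem.List.len board) (PySem.List.len (board.headD [])) := by
    rw [← hr, ← hcz]; exact pvFresh_shape rows cols hr0 hc0
  have hkeysF : ∀ (d : PySem.Dict Int (PySem.Set String)) (f : PySem.Set String → PySem.Set String),
      d.keys = K0 → (d.modify L' PySem.Set.empty f).keys = K0 := by
    intro d f hd
    have hct : d.contains L' = true := by
      rw [PySem.Dict.contains_eq_decide_mem_keys, hd]
      exact decide_eq_true hL'
    rw [PySem.Dict.keys_modify, PySem.Dict.keys_insert_of_contains _ _ hct, hd]
  have hinner : ∀ (i : Int), i ∈ PySem.List.pyRange 0 rows 1 →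
      ∀ (d : PySem.Dict Int (PySem.Set String)), d.keys = K0 →
      ((PySem.List.pyRange 0 cols 1).foldl (fun d j =>
          d.modify L' PySem.Set.empty (fun s => dfsA board L'.toNat i j (pvFresh rows cols) [] 1 L' s)) d).keys = K0 ∧
      ((PySem.List.pyRange 0 cols 1).foldl (fun d j =>
          d.modify L' PySem.Set.empty (fun s => dfsA board L'.toNat i j (pvFresh rows cols) [] 1 L' s)) d).getD L PySem.Set.empty =
        (if L = L' then
          PySem.Set.update (d.getD L PySem.Set.empty)
            ((PySem.List.pyRange 0 cols 1).flatMap (fun j => pvRecsL L' (ev board (pvCountFree (pvFresh rows cols) + 1) (pvFresh rows cols) i j [] 1)))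
         else d.getD L PySem.Set.empty) := by
    intro i hi
    have hib := PySem.List.mem_pyRange_one.mp hi
    by_cases hLL : L = L'
    · subst hLL
      intro d hd
      rw [if_pos rfl]
      refine pvFold_proj K0 L _ _ _ ?_ d hd
      intro d j hj hd'
      have hjb := PySem.List.mem_pyRange_one.mp hj
      have hfree := pvFresh_free rows cols i j hib.1 hib.2 hjb.1 hjb.2
      refine ⟨hkeysF d _ hd', ?_⟩
      rw [PySem.Dict.getD_modify_self,
        dfsA_eq board L (pvCountFree (pvFresh rows cols)) _ le_rfl hshape
          (pvCountFree (pvFresh rows cols) + 1) L.toNat i j [] 1 _ (Nat.lt_succ_self _) (by omega) hfree]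
    · intro d hd
      have h := pvFold_proj K0 L (fun _ => [])
        (fun d j => d.modify L' PySem.Set.empty (fun s => dfsA board L'.toNat i j (pvFresh rows cols) [] 1 L' s))
        (PySem.List.pyRange 0 cols 1) ?hF d hd
      · rw [if_neg hLL]
        refine ⟨h.1, ?_⟩
        rw [h.2, List.flatMap_eq_nil_iff.mpr (fun _ _ => rfl), PySem.Set.update_nil]
      · intro d j hj hd'
        refine ⟨hkeysF d _ hd', ?_⟩
        rw [PySem.Dict.getD_modify_of_ne _ _ _ hLL, PySem.Set.update_nil]
  intro d hd
  unfold pvPassA pvSR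
  by_cases hLL : L = L'
  · subst hLL
    have h := pvFold_proj K0 L
      (fun i => (PySem.List.pyRange 0 cols 1).flatMap (fun j => pvRecsL L (ev board (pvCountFree (pvFresh rows cols) + 1) (pvFresh rows cols) i j [] 1)))
      _ (PySem.List.pyRange 0 rows 1)
      (fun d i hi hd' => by
        have := hinner i hi d hd'
        rwa [if_pos rfl] at this) d hd
    rw [if_pos rfl]
    exact h
  · have h := pvFold_proj K0 L (fun _ => []) _ (PySem.List.pyRange 0 rows 1)
      (fun d i hi hd' => by
        have := hinner i hi d hd'
        rw [if_neg hLL] at this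
        exact ⟨this.1, by rw [this.2, PySem.Set.update_nil]⟩) d hd
    rw [if_neg hLL]
    exact ⟨h.1, by rw [h.2, List.flatMap_eq_nil_iff.mpr (fun _ _ => rfl), PySem.Set.update_nil]⟩

theorem pvTargetsA_proj (board : List (List String)) (rows cols : Int)
    (hr : rows = PySem.List.len board) (hcz : cols = PySem.List.len (board.headD []))
    (K0 : List Int) (L : Int) :
    ∀ (ts : List Int), (∀ u ∈ ts, u ∈ K0) →
    ∀ (d : PySem.Dict Int (PySem.Set String)), d.keys = K0 →
      (ts.foldl (pvPassA board rows cols) d).keys = K0 ∧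
      (ts.foldl (pvPassA board rows cols) d).getD L PySem.Set.empty =
        (if L ∈ ts then PySem.Set.update (d.getD L PySem.Set.empty) (pvSR board rows cols L)
         else d.getD L PySem.Set.empty) := by
  intro ts
  induction ts with
  | nil =>
    intro _ d hd
    exact ⟨by rw [List.foldl_nil]; exact hd,
      by rw [List.foldl_nil, if_neg (List.not_mem_nil)]⟩
  | cons t' ts' ih =>
    intro hts d hd
    have hp := pvPassA_proj board rows cols hr hcz K0 t' L (hts t' List.mem_cons_self) d hd
    have hrec := ih (fun u hu => hts u (List.mem_cons_of_mem _ hu)) _ hp.1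
    refine ⟨by rw [List.foldl_cons]; exact hrec.1, ?_⟩
    rw [List.foldl_cons, hrec.2, hp.2]
    by_cases hLt : L = t'
    · subst hLt
      rw [if_pos rfl, if_pos (List.mem_cons_self)]
      by_cases hLm : L ∈ ts'
      · rw [if_pos hLm, pvSet_update_update]
      · rw [if_neg hLm]
    · rw [if_neg hLt]
      by_cases hLm : L ∈ ts'
      · rw [if_pos hLm, if_pos (List.mem_cons_of_mem _ hLm)]
      · rw [if_neg hLm, if_neg (by simp [hLt, hLm])]

theorem pvResults0_getD (k : Int) : ∀ (ts : List Int) (d : PySem.Dict Int (PySem.Set String)),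
    d.getD k PySem.Set.empty = PySem.Set.empty →
    ((ts.foldl (fun d L => d.insert L PySem.Set.empty) d)).getD k PySem.Set.empty = PySem.Set.empty := by
  intro ts
  induction ts with
  | nil => intro d hd; exact hd
  | cons t ts ih =>
    intro d hd
    rw [List.foldl_cons]
    refine ih _ ?_
    rw [PySem.Dict.getD_insert]
    split <;> [rfl; exact hd]

theorem pvFoldInsert_getD (f : Int → PySem.Set String) :
    ∀ (ts : List Int) (d : PySem.Dict Int (PySem.Set String)) (k : Int),
      (ts.foldl (fun d L => d.insert L (f L)) d).getD k PySem.Set.empty =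
        if k ∈ ts then f k else d.getD k PySem.Set.empty := by
  intro ts
  induction ts with
  | nil =>
    intro d k
    rw [List.foldl_nil, if_neg (List.not_mem_nil)]
  | cons t ts ih =>
    intro d k
    rw [List.foldl_cons, ih]
    by_cases hk : k ∈ ts
    · rw [if_pos hk, if_pos (List.mem_cons_of_mem _ hk)]
    · rw [if_neg hk, PySem.Dict.getD_insert]
      by_cases hkt : k = t
      · subst hkt
        rw [if_pos rfl, if_pos (List.mem_cons_self)]
      · rw [if_neg hkt, if_neg (by simp [hkt, hk])]

theorem pvSR_nil_of_nonpos (board : List (List String)) (rows cols L : Int) (hL : L ≤ 0) :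
    pvSR board rows cols L = [] := by
  unfold pvSR
  rw [List.flatMap_eq_nil_iff]
  intro i _
  rw [List.flatMap_eq_nil_iff]
  intro j _
  apply pvRecsL_nil
  intro pc hpc
  have := ev_count_ge board _ _ i j [] 1 pc hpc
  omega

-- ===== VERDICT (by name: the statement is the Claim_ definition above) =====
theorem iterative_deepening_spec : Claim_equal_iterative_deepening := by
  unfold Claim_equal_iterative_deepening
  intro board target_lengths _ _
  unfold Spec_iterative_deepening
  set rows : Int := PySem.List.len board with hrdef
  set cols : Int := PySem.List.len (board.headD []) with hcdef
  have hr0 : (0 : Int) ≤ rows := by rw [hrdef]; simp [PySem.List.len_eq]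
  have hc0 : (0 : Int) ≤ cols := by rw [hcdef]; simp [PySem.List.len_eq]
  set ts := target_lengths with hts
  set K0 : List Int := PySem.Set.ofList ts with hK0def
  set results0 : PySem.Dict Int (PySem.Set String) :=
    ts.foldl (fun d L => d.insert L PySem.Set.empty) PySem.Dict.empty with hr0def
  have hAdef : iterative_deepening board ts = (ts.foldl (pvPassA board rows cols) results0).items := rfl
  have hvalB : ∀ L : Int, (if 1 ≤ L then
        (PySem.List.pyRange 0 rows 1).foldl (fun found i =>
          (PySem.List.pyRange 0 cols 1).foldl (fun found j =>
            stB board rows cols L (9 ^ ((min L (rows * cols + 1)).toNat)) [(i, j, [], PySem.Set.empty)] found) found) PySem.Set.empty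
       else PySem.Set.empty) = PySem.Set.update PySem.Set.empty (pvSR board rows cols L) := by
    intro L
    by_cases hL : 1 ≤ L
    · rw [if_pos hL, pvScanB board rows cols L hr0 hc0 hL]
    · rw [if_neg hL, pvSR_nil_of_nonpos board rows cols L (by omega), PySem.Set.update_nil]
  have hBdef : iterative_deepening_alt board ts =
      (ts.foldl (fun d length =>
        d.insert length
          (if 1 ≤ length then
            (PySem.List.pyRange 0 rows 1).foldl (fun found i =>
              (PySem.List.pyRange 0 cols 1).foldl (fun found j =>
                stB board rows cols length (9 ^ ((min length (rows * cols + 1)).toNat)) [(i, j, [], PySem.Set.empty)] found) found) PySem.Set.empty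
           else PySem.Set.empty)) PySem.Dict.empty).items := rfl
  have hK0 : results0.keys = K0 := by
    rw [hr0def, PySem.Dict.keys_foldl_insert, PySem.Dict.keys_empty]
    rfl
  have hKB : (ts.foldl (fun d length =>
        d.insert length
          (if 1 ≤ length then
            (PySem.List.pyRange 0 rows 1).foldl (fun found i =>
              (PySem.List.pyRange 0 cols 1).foldl (fun found j =>
                stB board rows cols length (9 ^ ((min length (rows * cols + 1)).toNat)) [(i, j, [], PySem.Set.empty)] found) found) PySem.Set.empty
           else PySem.Set.empty)) PySem.Dict.empty).keys = K0 := by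
    rw [PySem.Dict.keys_foldl_insert, PySem.Dict.keys_empty]
    rfl
  have hmemK0 : ∀ u : Int, u ∈ K0 ↔ u ∈ ts := fun u => PySem.Set.mem_ofList _ u
  have hnodup : K0.Nodup := by rw [hK0def]; exact PySem.Set.nodup_ofList _
  have hG0 : ∀ k : Int, results0.getD k PySem.Set.empty = PySem.Set.empty := by
    intro k
    rw [hr0def]
    exact pvResults0_getD k ts PySem.Dict.empty (PySem.Dict.getD_empty _ _)
  have hAside := pvTargetsA_proj board rows cols hrdef hcdef K0
  rw [hAdef, hBdef]
  have hAkeys : (ts.foldl (pvPassA board rows cols) results0).keys = K0 :=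
    (hAside 0 ts (fun u hu => (hmemK0 u).mpr hu) results0 hK0).1
  rw [PySem.Dict.items_eq_map_keys _ (by rw [hAkeys]; exact hnodup) PySem.Set.empty,
      PySem.Dict.items_eq_map_keys _ (by rw [hKB]; exact hnodup) PySem.Set.empty,
      hAkeys, hKB]
  refine List.map_congr_left ?_
  intro k hk
  have hkmem : k ∈ ts := (hmemK0 k).mp hk
  have hAk := (hAside k ts (fun u hu => (hmemK0 u).mpr hu) results0 hK0).2
  rw [if_pos hkmem] at hAk
  have hBk := pvFoldInsert_getD
    (fun L => (if 1 ≤ L then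
        (PySem.List.pyRange 0 rows 1).foldl (fun found i =>
          (PySem.List.pyRange 0 cols 1).foldl (fun found j =>
            stB board rows cols L (9 ^ ((min L (rows * cols + 1)).toNat)) [(i, j, [], PySem.Set.empty)] found) found) PySem.Set.empty
       else PySem.Set.empty)) ts PySem.Dict.empty k
  rw [if_pos hkmem] at hBk
  rw [hAk, hBk, hvalB k, hG0 k]
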